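-- pv_equiv track=rewrite | github.com/harukaeru/CompetitiveProgramming | abc227/B/main.py | check
-- ===== SOURCE A (Python) =====
-- def check(s):
--   is_ng = True
--   for a in range(1, 501):
--     for b in range(1, 501):
--       if s == 4 * a * b + 3 * a + 3 * b:
--         is_ng = False
--         return is_ng
--   return is_ng
-- ===== SOURCE B (Python) =====
-- def check(s):
--   for a in range(1, 501):
--     d = 4 * a + 3
--     q, r = divmod(s - 3 * a, d)
--     if r == 0 and 1 <= q <= 500:
--       return False
--   return True
-- ===== Notes on version B (the rewrite author's own statement) =====
-- stated objective: faster
-- what changed: Instead of brute-forcing the full quadratic grid of (a,b) pairs, loop over a only and solve b = (s-3a)/(4a+3) by division, checking it is an integer in range.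
import Mathlib
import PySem

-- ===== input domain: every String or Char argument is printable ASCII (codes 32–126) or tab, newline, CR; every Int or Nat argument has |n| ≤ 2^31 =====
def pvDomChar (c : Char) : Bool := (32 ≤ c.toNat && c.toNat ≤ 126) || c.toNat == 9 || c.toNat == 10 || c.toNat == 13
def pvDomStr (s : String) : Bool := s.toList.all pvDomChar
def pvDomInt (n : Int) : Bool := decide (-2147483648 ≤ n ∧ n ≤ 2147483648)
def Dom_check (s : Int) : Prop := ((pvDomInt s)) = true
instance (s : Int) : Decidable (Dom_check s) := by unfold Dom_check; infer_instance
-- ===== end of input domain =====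

-- B replaces the 500×500 brute-force pair scan by a single loop over a, solving b by division.

-- ===== PORT A =====
-- nested for-loops with early 'return False' ported as any/any
def check (s : Int) : Bool :=
  !((PySem.List.pyRange 1 501 1).any fun a =>
      (PySem.List.pyRange 1 501 1).any fun b =>
        s == 4 * a * b + 3 * a + 3 * b)

-- ===== PORT B =====
def check_alt (s : Int) : Bool :=
  !((PySem.List.pyRange 1 501 1).any fun a =>
      let d := 4 * a + 3
      let q := PySem.Int.floordiv (s - 3 * a) d
      let r := PySem.Int.mod (s - 3 * a) d
      r == 0 && (decide (1 ≤ q) && decide (q ≤ 500)))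

-- ===== PRECONDITION & SPEC =====
def Spec_check (s : Int) (out : Bool) : Prop := out = check_alt s
instance (s : Int) (out : Bool) : Decidable (Spec_check s out) := by unfold Spec_check; infer_instance

-- ===== CLAIM (what is proved, stated in full; the proofs are below) =====
def Claim_equal_check : Prop := ∀ (s : Int), Dom_check s → Spec_check s (check s)

-- ===== LEMMAS AND PROOFS =====

-- per-a equivalence: ∃ b in 1..500 with s = 4ab+3a+3b  ↔  (4a+3) divides s-3a with quotient in 1..500
theorem pv_inner_iff (s a : Int) (ha : 1 ≤ a) :
    (∃ b, (1 ≤ b ∧ b < 501) ∧ s = 4 * a * b + 3 * a + 3 * b) ↔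
      ((s - 3 * a) % (4 * a + 3) = 0 ∧
        1 ≤ (s - 3 * a) / (4 * a + 3) ∧ (s - 3 * a) / (4 * a + 3) ≤ 500) := by
  have hd : (0 : Int) < 4 * a + 3 := by omega
  constructor
  · rintro ⟨b, ⟨hb1, hb2⟩, rfl⟩
    have he : 4 * a * b + 3 * a + 3 * b - 3 * a = (4 * a + 3) * b := by ring
    rw [he, Int.mul_emod_right, Int.mul_ediv_cancel_left _ (by omega)]
    exact ⟨rfl, hb1, by omega⟩
  · rintro ⟨hr, hq1, hq2⟩
    set q := (s - 3 * a) / (4 * a + 3) with hq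
    have hde := Int.ediv_add_emod (s - 3 * a) (4 * a + 3)
    rw [hr, ← hq] at hde
    exact ⟨q, ⟨hq1, by omega⟩, by linear_combination -hde⟩

theorem pv_any_eq (s : Int) :
    ((PySem.List.pyRange 1 501 1).any fun a =>
        (PySem.List.pyRange 1 501 1).any fun b =>
          s == 4 * a * b + 3 * a + 3 * b) =
      ((PySem.List.pyRange 1 501 1).any fun a =>
        let d := 4 * a + 3
        let q := PySem.Int.floordiv (s - 3 * a) d
        let r := PySem.Int.mod (s - 3 * a) d
        r == 0 && (decide (1 ≤ q) && decide (q ≤ 500))) := by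
  rw [Bool.eq_iff_iff]
  simp only [List.any_eq_true, PySem.List.mem_pyRange_one, beq_iff_eq,
    Bool.and_eq_true, decide_eq_true_eq]
  constructor
  · rintro ⟨a, ⟨ha1, ha2⟩, b, ⟨hb1, hb2⟩, hs⟩
    refine ⟨a, ⟨ha1, ha2⟩, ?_⟩
    have hd : (0 : Int) < 4 * a + 3 := by omega
    have := (pv_inner_iff s a ha1).mp ⟨b, ⟨hb1, hb2⟩, hs⟩
    simp only [PySem.Int.mod_eq_emod_of_pos hd, PySem.Int.floordiv_eq_ediv_of_pos hd]
    exact ⟨this.1, this.2.1, this.2.2⟩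
  · rintro ⟨a, ⟨ha1, ha2⟩, hcond⟩
    have hd : (0 : Int) < 4 * a + 3 := by omega
    simp only [PySem.Int.mod_eq_emod_of_pos hd, PySem.Int.floordiv_eq_ediv_of_pos hd] at hcond
    obtain ⟨b, ⟨hb1, hb2⟩, hs⟩ := (pv_inner_iff s a ha1).mpr ⟨hcond.1, hcond.2.1, hcond.2.2⟩
    exact ⟨a, ⟨ha1, ha2⟩, b, ⟨hb1, hb2⟩, hs⟩

-- ===== VERDICT (by name: the statement is the Claim_ definition above) =====
theorem check_spec : Claim_equal_check := by
  intro s _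
  unfold Spec_check check check_alt
  exact congrArg (fun x => !x) (pv_any_eq s)
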